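-- pv_equiv track=rewrite | github.com/suzmue/quesadilla | generate/strategy.py | get_schedule
-- ===== SOURCE A (Python) =====
-- def get_schedule(permutation):
--     schedule = []
--     current = []
--     fixed = []
--     for i in range(len(permutation)):
--         # Check if it needs to be sorted.
--         needs_sort = False
--         for j in range(i + 1, len(permutation)):
--             if permutation[j] < permutation[i]:
--                 needs_sort = True
--
--         if needs_sort:
--             current.append(permutation[i])
--             continue
--
--         for j in range(len(current) - 1, -1, -1):
--             schedule.append( (current[j], fixed.copy()))
--
--         for mode in current:
--             fixed.append(mode)
--
--         fixed.append(permutation[i])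
--
--         current = []
--
--     return schedule
-- ===== SOURCE B (Python) =====
-- def get_schedule(permutation):
--     # One backward pass precomputes suffix minima; needs_sort is then an O(1) test,
--     # removing A's O(n^2) inner scan.
--     smins = []
--     m = None
--     for v in reversed(permutation):
--         smins.append(m)
--         if m is None or v < m:
--             m = v
--     smins.reverse()
--
--     schedule = []
--     current = []
--     fixed = []
--     for v, sm in zip(permutation, smins):
--         if sm is not None and sm < v:
--             current.append(v)
--         else:
--             for w in reversed(current):
--                 schedule.append((w, fixed))
--             fixed = fixed + current + [v]
--             current = []
--     return schedule
-- ===== Notes on version B (the rewrite author's own statement) =====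
-- stated objective: faster
-- what changed: Replaces A's per-element inner scan of the remaining suffix with a single backward pass that precomputes suffix minima, so the needs-sort test becomes an O(1) comparison; the flush also rebinds 'fixed' instead of copying it per appended pair.
import Mathlib
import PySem

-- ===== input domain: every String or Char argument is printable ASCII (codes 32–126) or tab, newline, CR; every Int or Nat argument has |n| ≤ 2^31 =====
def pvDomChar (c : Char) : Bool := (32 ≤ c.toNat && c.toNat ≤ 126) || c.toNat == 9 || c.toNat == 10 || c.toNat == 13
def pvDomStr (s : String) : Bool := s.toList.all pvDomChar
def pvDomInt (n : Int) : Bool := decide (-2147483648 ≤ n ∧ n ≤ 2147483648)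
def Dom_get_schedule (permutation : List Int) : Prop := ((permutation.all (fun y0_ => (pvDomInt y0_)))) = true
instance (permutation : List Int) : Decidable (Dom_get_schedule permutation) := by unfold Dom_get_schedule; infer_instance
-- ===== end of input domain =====

-- B replaces A's per-element inner scan by a precomputed suffix-minimum array
-- (objective: faster).

-- ===== PORT A =====
-- literal transliteration of A: outer loop over range(len), inner scan over
-- range(i+1, len) setting a flag, reversed-index flush loop, extend-by-loop on fixed.
-- p[i]/p[j] (indices always in range here) ported as pyGetD _ _ 0.
def get_schedule (permutation : List Int) : List (Int × List Int) :=
  let n : Int := permutation.length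
  let st := (PySem.List.pyRange 0 n 1).foldl
    (fun (st : List (Int × List Int) × List Int × List Int) i =>
      let schedule := st.1
      let current := st.2.1
      let fixed := st.2.2
      let needs_sort := (PySem.List.pyRange (i + 1) n 1).foldl
        (fun b j =>
          if PySem.List.pyGetD permutation j 0 < PySem.List.pyGetD permutation i 0 then true else b)
        false
      if needs_sort then
        (schedule, current ++ [PySem.List.pyGetD permutation i 0], fixed)
      else
        let schedule := (PySem.List.pyRange ((current.length : Int) - 1) (-1) (-1)).foldl
          (fun s j => s ++ [(PySem.List.pyGetD current j 0, fixed)]) schedule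
        let fixed := current.foldl (fun f m => f ++ [m]) fixed
        let fixed := fixed ++ [PySem.List.pyGetD permutation i 0]
        (schedule, ([] : List Int), fixed))
    ([], [], [])
  st.1

-- ===== PORT B =====
-- literal transliteration of Source B: backward pass building smins (None for the last
-- element), then one forward pass over zip(permutation, smins).
def get_schedule_alt (permutation : List Int) : List (Int × List Int) :=
  let sm := permutation.reverse.foldl
    (fun (st : List (Option Int) × Option Int) v =>
      let smins := st.1 ++ [st.2]
      let m := match st.2 with
        | none => some v
        | some m0 => if v < m0 then some v else some m0
      (smins, m))
    ([], none)
  let smins := sm.1.reverse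
  let st := (permutation.zip smins).foldl
    (fun (st : List (Int × List Int) × List Int × List Int) p =>
      let schedule := st.1
      let current := st.2.1
      let fixed := st.2.2
      let cond : Bool := match p.2 with
        | some s => decide (s < p.1)
        | none => false
      if cond then
        (schedule, current ++ [p.1], fixed)
      else
        let schedule := current.reverse.foldl (fun s w => s ++ [(w, fixed)]) schedule
        (schedule, ([] : List Int), fixed ++ current ++ [p.1]))
    ([], [], [])
  st.1

-- ===== PRECONDITION & SPEC =====
def Spec_get_schedule (permutation : List Int) (out : List (Int × List Int)) : Prop := out = get_schedule_alt permutation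
instance (permutation : List Int) (out : List (Int × List Int)) : Decidable (Spec_get_schedule permutation out) := by unfold Spec_get_schedule; infer_instance

-- ===== CLAIM (what is proved, stated in full; the proofs are below) =====
def Claim_equal_get_schedule : Prop := ∀ (permutation : List Int), Dom_get_schedule permutation → Spec_get_schedule permutation (get_schedule permutation)

-- ===== LEMMAS AND PROOFS =====

-- the running-minimum update of Source B's backward pass
def pvUpd (m : Option Int) (v : Int) : Option Int :=
  match m with
  | none => some v
  | some m0 => if v < m0 then some v else some m0

-- the smins collected by Source B's backward pass over a list, given the incoming minimum
def pvGG : List Int → Option Int → List (Option Int)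
  | [], _ => []
  | x :: xs, m => m :: pvGG xs (pvUpd m x)

-- common recursive description of both main loops
def pvGo : List Int → List (Int × List Int) × List Int × List Int → List (Int × List Int)
  | [], st => st.1
  | v :: rest, st =>
      if rest.any (fun x => decide (x < v)) then
        pvGo rest (st.1, st.2.1 ++ [v], st.2.2)
      else
        pvGo rest (st.1 ++ st.2.1.reverse.map (fun w => (w, st.2.2)), [], st.2.2 ++ st.2.1 ++ [v])

-- the step function of A's outer loop (definitionally the lambda in get_schedule)
def pvStepA (permutation : List Int) (st : List (Int × List Int) × List Int × List Int) (i : Int) :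
    List (Int × List Int) × List Int × List Int :=
  let n : Int := permutation.length
  let schedule := st.1
  let current := st.2.1
  let fixed := st.2.2
  let needs_sort := (PySem.List.pyRange (i + 1) n 1).foldl
    (fun b j =>
      if PySem.List.pyGetD permutation j 0 < PySem.List.pyGetD permutation i 0 then true else b)
    false
  if needs_sort then
    (schedule, current ++ [PySem.List.pyGetD permutation i 0], fixed)
  else
    let schedule := (PySem.List.pyRange ((current.length : Int) - 1) (-1) (-1)).foldl
      (fun s j => s ++ [(PySem.List.pyGetD current j 0, fixed)]) schedule
    let fixed := current.foldl (fun f m => f ++ [m]) fixed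
    let fixed := fixed ++ [PySem.List.pyGetD permutation i 0]
    (schedule, ([] : List Int), fixed)

-- the step function of B's main loop (definitionally the lambda in get_schedule_alt)
def pvStepB (st : List (Int × List Int) × List Int × List Int) (p : Int × Option Int) :
    List (Int × List Int) × List Int × List Int :=
  let schedule := st.1
  let current := st.2.1
  let fixed := st.2.2
  let cond : Bool := match p.2 with
    | some s => decide (s < p.1)
    | none => false
  if cond then
    (schedule, current ++ [p.1], fixed)
  else
    let schedule := current.reverse.foldl (fun s w => s ++ [(w, fixed)]) schedule
    (schedule, ([] : List Int), fixed ++ current ++ [p.1])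

-- "running minimum of l is below v" ⟺ "some element of l is below v"
theorem pvUpd_any (l : List Int) (m0 : Option Int) (v : Int) :
    (match l.foldl pvUpd m0 with | none => false | some s => decide (s < v))
      = ((match m0 with | none => false | some s => decide (s < v))
          || l.any (fun x => decide (x < v))) := by
  induction l generalizing m0 with
  | nil => simp
  | cons x xs ih =>
    rw [List.foldl_cons, ih]
    cases m0 with
    | none => simp [pvUpd]
    | some s =>
      by_cases h : x < s <;>
        simp [pvUpd, h, List.any_cons, ← Bool.or_assoc] <;> congr 1 <;>
        by_cases h1 : s < v <;> by_cases h2 : x < v <;> simp_all <;> omega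

theorem pvGG_append (l1 l2 : List Int) (m : Option Int) :
    pvGG (l1 ++ l2) m = pvGG l1 m ++ pvGG l2 (l1.foldl pvUpd m) := by
  induction l1 generalizing m with
  | nil => simp [pvGG]
  | cons x xs ih => simp [pvGG, ih]

-- Source B's backward pass, characterised
theorem pvBackward (l : List Int) (s : List (Option Int)) (m : Option Int) :
    l.foldl
      (fun (st : List (Option Int) × Option Int) v =>
        (st.1 ++ [st.2],
          match st.2 with
          | none => some v
          | some m0 => if v < m0 then some v else some m0)) (s, m)
      = (s ++ pvGG l m, l.foldl pvUpd m) := by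
  induction l generalizing s m with
  | nil => simp [pvGG]
  | cons x xs ih =>
    rw [List.foldl_cons, ih]
    simp [pvGG, pvUpd]

def pvSmins (p : List Int) : List (Option Int) := (pvGG p.reverse none).reverse

theorem pvSmins_cons (v : Int) (rest : List Int) :
    pvSmins (v :: rest) = (rest.reverse.foldl pvUpd none) :: pvSmins rest := by
  unfold pvSmins
  rw [List.reverse_cons, pvGG_append]
  simp [pvGG]

-- flatten-of-singleton-map normal form vs reversed map (used to align simp normal forms)
theorem pvFlatten (l : List Int) (fx : List Int) :
    (List.map (fun x => [(x, fx)]) l).reverse.flatten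
      = (List.map (fun w => (w, fx)) l).reverse := by
  induction l with
  | nil => simp
  | cons x xs ih => simp [ih]

-- B's main loop equals pvGo
theorem pvAltMain (p : List Int) (st : List (Int × List Int) × List Int × List Int) :
    ((p.zip (pvSmins p)).foldl pvStepB st).1 = pvGo p st := by
  induction p generalizing st with
  | nil => simp [pvSmins, pvGG, pvGo]
  | cons v rest ih =>
    rw [pvSmins_cons, List.zip_cons_cons, List.foldl_cons, ih]
    have h0 := pvUpd_any rest.reverse none v
    rw [List.any_reverse] at h0
    cases hM : List.foldl pvUpd none rest.reverse with
    | none =>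
      rw [hM] at h0
      simp only [Bool.false_or] at h0
      simp [pvStepB, pvGo, ← h0, pvFlatten]
    | some s =>
      rw [hM] at h0
      simp only [Bool.false_or] at h0
      by_cases hsv : s < v
      · simp [pvStepB, pvGo, ← h0, hsv]
      · simp [pvStepB, pvGo, ← h0, hsv, pvFlatten]

theorem get_schedule_alt_eq (p : List Int) : get_schedule_alt p = pvGo p ([], [], []) := by
  have h := pvAltMain p ([], [], [])
  simp only [get_schedule_alt]
  rw [pvBackward]
  exact h

-- an or-accumulating flag loop is an any
theorem pvFoldIfLt (c : Int) (l : List Int) (b : Bool) :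
    l.foldl (fun acc x => if x < c then true else acc) b
      = (b || l.any (fun x => decide (x < c))) := by
  induction l generalizing b with
  | nil => simp
  | cons x xs ih =>
    rw [List.foldl_cons]
    by_cases h : x < c
    · rw [if_pos h, ih]
      simp [h]
    · rw [if_neg h, ih]
      simp [h]

-- A's inner needs_sort scan equals an any over the dropped suffix
theorem pvNeedsSort (p : List Int) (k : Nat) (hk : k < p.length) :
    (PySem.List.pyRange ((k : Int) + 1) ((p.length : Int)) 1).foldl
      (fun b j =>
        if PySem.List.pyGetD p j 0 < PySem.List.pyGetD p (k : Int) 0 then true else b) false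
      = (p.drop (k + 1)).any (fun x => decide (x < p[k])) := by
  have hget : PySem.List.pyGetD p (k : Int) 0 = p[k] := by
    rw [PySem.List.pyGetD_natCast]
    exact List.getD_eq_getElem p 0 hk
  have hcast : ((k : Int) + 1) = ((k + 1 : Nat) : Int) := by push_cast; ring
  rw [hcast,
    PySem.List.foldl_pyRange_pyGetD' p 0
      (fun acc x => if x < PySem.List.pyGetD p (k : Int) 0 then true else acc) false
      (by positivity)]
  rw [pvFoldIfLt, hget]
  simp

-- A's reversed-index flush loop appends the reversed current, each with fixed
theorem pvFlush (cur : List Int) (fix : List Int) (sch : List (Int × List Int)) :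
    (PySem.List.pyRange ((cur.length : Int) - 1) (-1) (-1)).foldl
      (fun s j => s ++ [(PySem.List.pyGetD cur j 0, fix)]) sch
      = sch ++ cur.reverse.map (fun w => (w, fix)) := by
  have h : PySem.List.pyRange ((cur.length : Int) - 1) (-1) (-1)
      = (PySem.List.pyRange 0 (cur.length : Int)).reverse := by
    rw [PySem.List.pyRange_neg_one_eq_reverse]
    norm_num
  have hmap : (PySem.List.pyRange 0 (cur.length : Int)).map
      (fun j => (PySem.List.pyGetD cur j 0, fix)) = cur.map (fun w => (w, fix)) := by
    calc (PySem.List.pyRange 0 (cur.length : Int)).map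
          (fun j => (PySem.List.pyGetD cur j 0, fix))
        = ((PySem.List.pyRange 0 (cur.length : Int)).map
            (fun j => PySem.List.pyGetD cur j 0)).map (fun w => (w, fix)) := by
          rw [List.map_map]
          rfl
      _ = cur.map (fun w => (w, fix)) := by
          rw [PySem.List.map_pyGetD_pyRange_zero']
  rw [h, PySem.List.foldl_append_singleton_eq_map, List.map_reverse, hmap, ← List.map_reverse]

-- A's outer loop from index k equals pvGo on the dropped suffix
theorem pvAMain (p : List Int) (n : Nat) :
    ∀ (k : Nat) (st : List (Int × List Int) × List Int × List Int),
    k ≤ p.length → p.length - k = n →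
    ((PySem.List.pyRange (k : Int) ((p.length : Int)) 1).foldl (pvStepA p) st).1
      = pvGo (p.drop k) st := by
  induction n with
  | zero =>
    intro k st hk hn
    have hk' : k = p.length := by omega
    subst hk'
    rw [PySem.List.pyRange_one_eq_nil (by omega)]
    simp [pvGo]
  | succ n ih =>
    intro k st hk hn
    have hklt : k < p.length := by omega
    rw [PySem.List.pyRange_one_cons (by exact_mod_cast hklt), List.foldl_cons]
    have hcast : ((k : Int) + 1) = ((k + 1 : Nat) : Int) := by push_cast; ring
    rw [hcast, ih (k + 1) (pvStepA p st (k : Int)) (by omega) (by omega)]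
    have hdrop : p.drop k = p[k] :: p.drop (k + 1) := List.drop_eq_getElem_cons hklt
    rw [hdrop]
    have hget : PySem.List.pyGetD p (k : Int) 0 = p[k] := by
      rw [PySem.List.pyGetD_natCast]
      exact List.getD_eq_getElem p 0 hklt
    simp only [pvStepA]
    rw [pvNeedsSort p k hklt]
    cases hany : (p.drop (k + 1)).any (fun x => decide (x < p[k])) with
    | true => simp [pvGo, hany, hget]
    | false =>
      rw [pvFlush, PySem.List.foldl_append_singleton_eq_self, hget]
      simp [pvGo, hany]

theorem get_schedule_eq (p : List Int) : get_schedule p = pvGo p ([], [], []) := by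
  have h := pvAMain p p.length 0 ([], [], []) (by omega) (by omega)
  simp only [List.drop_zero, Nat.cast_zero] at h
  simp only [get_schedule]
  exact h

-- ===== VERDICT (by name: the statement is the Claim_ definition above) =====
theorem get_schedule_spec : Claim_equal_get_schedule := by
  intro p _
  unfold Spec_get_schedule
  rw [get_schedule_eq, get_schedule_alt_eq]
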